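-- pv_equiv track=rewrite | github.com/agent-planning/Plan2Dance_docker | backend/Plan2Dance_backend/plan2dance/Plan2Dance/planning_domain_definition_language/problem.py | _update_beat_list
-- ===== SOURCE A (Python) =====
-- def _update_beat_list(beat_list, start, end):
--     """
--         根据start和end标记的时间位置，确定其中存在在其中的beat_list的值
--     """
--     start_point = None
--     end_point = None
--     for index, beat in enumerate(beat_list):
--         if index == len(beat_list) - 1:
--             start_point = index
--         if beat >= start:  # start小于当前beat时间，确定当前为其范围内端点
--             start_point = index
--             break
--     for index, beat in enumerate(beat_list):
--         if index == len(beat_list) - 1: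
--             end_point = index + 1
--         if beat >= end:  # end小于当前beat时间，确定前一个为其范围内端点
--             end_point = index
--             break
--     new_list = [v - start for v in beat_list[start_point:end_point]]
--     return new_list
-- ===== SOURCE B (Python) =====
-- def _update_beat_list(beat_list, start, end):
--     """Stream once: collect offset beats from the first beat >= start,
--     stopping at the first beat >= end."""
--     out = []
--     collecting = False
--     for b in beat_list:
--         if b >= end:
--             break
--         if collecting or b >= start:
--             collecting = True
--             out.append(b - start)
--     return out
-- ===== Notes on version B (the rewrite author's own statement) =====
-- stated objective: faster
-- what changed: Replaced A's two full index-tracking scans plus a slice-and-offset comprehension with a single streaming pass that starts collecting offset beats at the first beat >= start and stops at the first beat >= end.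
-- intended difference: On a non-empty beat_list whose beats are all below both start and end, A returns the single out-of-range last beat [beat_list[-1] - start] (an artefact of its start_point-defaults-to-last-index fallback), while B returns [], the intended 'no beats in range' answer. — e.g. on _update_beat_list([5], 10, 10): A returns [-5], B returns []
import Mathlib
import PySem

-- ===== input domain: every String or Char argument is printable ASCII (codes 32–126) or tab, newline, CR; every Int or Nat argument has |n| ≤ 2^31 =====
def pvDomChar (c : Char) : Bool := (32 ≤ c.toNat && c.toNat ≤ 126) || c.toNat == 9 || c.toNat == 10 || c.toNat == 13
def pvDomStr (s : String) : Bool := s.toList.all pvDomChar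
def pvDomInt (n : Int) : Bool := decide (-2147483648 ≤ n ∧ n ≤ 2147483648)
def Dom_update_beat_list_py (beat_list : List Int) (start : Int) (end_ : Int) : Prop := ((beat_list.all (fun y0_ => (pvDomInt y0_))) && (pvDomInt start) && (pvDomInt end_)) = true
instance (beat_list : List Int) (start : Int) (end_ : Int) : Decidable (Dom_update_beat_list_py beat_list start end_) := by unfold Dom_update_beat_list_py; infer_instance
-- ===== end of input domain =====

-- B replaces A's two index-tracking scans plus slice-and-map with one streaming pass
-- that collects the offset beats directly; where all beats lie below start and end,
-- B returns [] instead of A's accidental single-element fallback (see D_ below).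

-- ===== PORT A =====
-- first loop of A: carries the running index and the current start_point
def aLoop1 (start : Int) (lastIdx : Nat) : List Int → Nat → Option Nat → Option Nat
  | [], _, sp => sp
  | beat :: rest, index, sp =>
    let sp' := if index = lastIdx then some index else sp
    if start ≤ beat then some index else aLoop1 start lastIdx rest (index + 1) sp'

-- second loop of A: carries the running index and the current end_point
def aLoop2 (end_ : Int) (lastIdx : Nat) : List Int → Nat → Option Nat → Option Nat
  | [], _, ep => ep
  | beat :: rest, index, ep =>
    let ep' := if index = lastIdx then some (index + 1) else ep
    if end_ ≤ beat then some index else aLoop2 end_ lastIdx rest (index + 1) ep'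

def update_beat_list_py (beat_list : List Int) (start : Int) (end_ : Int) : List Int :=
  let n := beat_list.length
  let sp := aLoop1 start (n - 1) beat_list 0 none
  let ep := aLoop2 end_ (n - 1) beat_list 0 none
  -- Python slice beat_list[sp:ep]: sp is None only when the list is empty (→ 0),
  -- ep is None only when the list is empty (→ len); both loop results are in
  -- [0,n] so the slice is exactly drop/take here.
  ((beat_list.drop (sp.getD 0)).take (ep.getD n - sp.getD 0)).map (fun v => v - start)

-- ===== PORT B =====
-- Source B's single loop with its accumulator `out` and the `collecting` flag
def bLoop (start end_ : Int) : List Int → List Int → Bool → List Int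
  | [], out, _ => out
  | b :: rest, out, collecting =>
    if end_ ≤ b then out
    else if collecting || decide (start ≤ b) then bLoop start end_ rest (out ++ [b - start]) true
    else bLoop start end_ rest out collecting

def update_beat_list_py_alt (beat_list : List Int) (start : Int) (end_ : Int) : List Int :=
  bLoop start end_ beat_list [] false

-- ===== PRECONDITION & SPEC =====
-- On a non-empty beat_list whose beats are all below both start and end, A returns
-- [beat_list[-1] - start] (its start_point falls back to the last index), while B
-- returns [], the intended "no beats in range" answer.
def D_update_beat_list_py (beat_list : List Int) (start : Int) (end_ : Int) : Prop :=
  beat_list ≠ [] ∧ ∀ b ∈ beat_list, b < start ∧ b < end_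
instance (beat_list : List Int) (start : Int) (end_ : Int) : Decidable (D_update_beat_list_py beat_list start end_) := by unfold D_update_beat_list_py; infer_instance

def Spec_update_beat_list_py (beat_list : List Int) (start : Int) (end_ : Int) (out : List Int) : Prop := ¬ D_update_beat_list_py beat_list start end_ → out = update_beat_list_py_alt beat_list start end_
instance (beat_list : List Int) (start : Int) (end_ : Int) (out : List Int) : Decidable (Spec_update_beat_list_py beat_list start end_ out) := by unfold Spec_update_beat_list_py; infer_instance

def pvDiffWitness_update_beat_list_py : List Int × Int × Int := ([5], 10, 10)
def pvDiffWitnessOut_update_beat_list_py : (List Int) × (List Int) := ([-5], [])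

-- ===== CLAIM (what is proved, stated in full; the proofs are below) =====
def Claim_unchanged_update_beat_list_py : Prop := ∀ (beat_list : List Int) (start : Int) (end_ : Int), Dom_update_beat_list_py beat_list start end_ → Spec_update_beat_list_py beat_list start end_ (update_beat_list_py beat_list start end_)
def Claim_changed_update_beat_list_py : Prop := Dom_update_beat_list_py (pvDiffWitness_update_beat_list_py.1) (pvDiffWitness_update_beat_list_py.2.1) (pvDiffWitness_update_beat_list_py.2.2) ∧ D_update_beat_list_py (pvDiffWitness_update_beat_list_py.1) (pvDiffWitness_update_beat_list_py.2.1) (pvDiffWitness_update_beat_list_py.2.2) ∧ update_beat_list_py (pvDiffWitness_update_beat_list_py.1) (pvDiffWitness_update_beat_list_py.2.1) (pvDiffWitness_update_beat_list_py.2.2) = pvDiffWitnessOut_update_beat_list_py.1 ∧ update_beat_list_py_alt (pvDiffWitness_update_beat_list_py.1) (pvDiffWitness_update_beat_list_py.2.1) (pvDiffWitness_update_beat_list_py.2.2) = pvDiffWitnessOut_update_beat_list_py.2 ∧ pvDiffWitnessOut_update_beat_list_py.1 ≠ pvDiffWitnessOut_update_beat_list_py.2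
def Claim_exact_update_beat_list_py : Prop := ∀ (beat_list : List Int) (start : Int) (end_ : Int), Dom_update_beat_list_py beat_list start end_ → D_update_beat_list_py beat_list start end_ → update_beat_list_py beat_list start end_ ≠ update_beat_list_py_alt beat_list start end_

-- ===== LEMMAS AND PROOFS =====

-- middle form of A: a drop/take slice between the two found indices (findIdx? start
-- falling back to n-1, findIdx? end falling back to n)
def sIdx (beat_list : List Int) (start : Int) : Nat :=
  (beat_list.findIdx? (fun b => decide (start ≤ b))).getD (beat_list.length - 1)

def eIdx (beat_list : List Int) (end_ : Int) : Nat :=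
  (beat_list.findIdx? (fun b => decide (end_ ≤ b))).getD beat_list.length

def mid (beat_list : List Int) (start end_ : Int) : List Int :=
  ((beat_list.drop (sIdx beat_list start)).take (eIdx beat_list end_ - sIdx beat_list start)).map
    (fun v => v - start)

-- middle form of B: same slice but findIdx? start falls back to n (empty slice)
def sIdxB (beat_list : List Int) (start : Int) : Nat :=
  (beat_list.findIdx? (fun b => decide (start ≤ b))).getD beat_list.length

def midB (beat_list : List Int) (start end_ : Int) : List Int :=
  ((beat_list.drop (sIdxB beat_list start)).take (eIdx beat_list end_ - sIdxB beat_list start)).map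
    (fun v => v - start)

theorem aLoop1_spec (start : Int) (l : List Int) (i : Nat) (sp : Option Nat) (n : Nat)
    (h : i + l.length = n) :
    aLoop1 start (n - 1) l i sp =
      match l.findIdx? (fun b => decide (start ≤ b)) with
      | some j => some (i + j)
      | none => if l.isEmpty then sp else some (n - 1) := by
  induction l generalizing i sp with
  | nil => simp [aLoop1]
  | cons b rest ih =>
    simp only [aLoop1, List.findIdx?_cons]
    by_cases hb : start ≤ b
    · simp [hb]
    · have h' : (i + 1) + rest.length = n := by simp at h; omega
      rw [if_neg hb, ih (i + 1) _ h']
      cases hf : rest.findIdx? (fun b => decide (start ≤ b)) with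
      | some j => simp [hb] <;> omega
      | none =>
        cases rest with
        | nil =>
          have hi : i = n - 1 := by simp at h; omega
          simp [hb, hi]
        | cons c cs => simp [hb]

theorem aLoop2_spec (end_ : Int) (l : List Int) (i : Nat) (ep : Option Nat) (n : Nat)
    (h : i + l.length = n) :
    aLoop2 end_ (n - 1) l i ep =
      match l.findIdx? (fun b => decide (end_ ≤ b)) with
      | some j => some (i + j)
      | none => if l.isEmpty then ep else some n := by
  induction l generalizing i ep with
  | nil => simp [aLoop2]
  | cons b rest ih =>
    simp only [aLoop2, List.findIdx?_cons]
    by_cases hb : end_ ≤ b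
    · simp [hb]
    · have h' : (i + 1) + rest.length = n := by simp at h; omega
      rw [if_neg hb, ih (i + 1) _ h']
      cases hf : rest.findIdx? (fun b => decide (end_ ≤ b)) with
      | some j => simp [hb] <;> omega
      | none =>
        cases rest with
        | nil =>
          have hi : i = n - 1 := by simp at h; omega
          have hn : i + 1 = n := by simp at h; omega
          simp [hb, hi] <;> omega
        | cons c cs => simp [hb]

theorem portA_eq_mid (beat_list : List Int) (start end_ : Int) :
    update_beat_list_py beat_list start end_ = mid beat_list start end_ := by
  have h1 := aLoop1_spec start beat_list 0 none beat_list.length (by simp)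
  have h2 := aLoop2_spec end_ beat_list 0 none beat_list.length (by simp)
  simp only [update_beat_list_py, mid, sIdx, eIdx, h1, h2]
  cases beat_list with
  | nil => simp
  | cons b rest =>
    cases hf : (b :: rest).findIdx? (fun b => decide (start ≤ b)) <;>
      cases hg : (b :: rest).findIdx? (fun b => decide (end_ ≤ b)) <;>
      simp [hf, hg]

theorem findIdx?_append_none {α : Type} (p : α → Bool) (pre l : List α)
    (h : ∀ b ∈ pre, p b = false) :
    List.findIdx? p (pre ++ l) = (List.findIdx? p l).map (· + pre.length) := by
  induction pre with
  | nil => simp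
  | cons a pre ih =>
    have ha : p a = false := h a (by simp)
    simp only [List.cons_append, List.findIdx?_cons, ha]
    rw [ih (fun b hb => h b (by simp [hb]))]
    cases List.findIdx? p l <;> simp <;> omega

theorem bLoop_collecting (start end_ : Int) (l out : List Int) :
    bLoop start end_ l out true =
      out ++ (l.take ((l.findIdx? (fun b => decide (end_ ≤ b))).getD l.length)).map
        (fun v => v - start) := by
  induction l generalizing out with
  | nil => simp [bLoop]
  | cons b rest ih =>
    simp only [bLoop, List.findIdx?_cons]
    by_cases hb : end_ ≤ b
    · simp [hb]
    · rw [if_neg hb, if_pos (by simp), ih]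
      cases hf : rest.findIdx? (fun b => decide (end_ ≤ b)) <;> simp [hb]

theorem bLoop_scan (start end_ : Int) (pre l : List Int)
    (hpre : ∀ b ∈ pre, b < start ∧ b < end_) :
    bLoop start end_ l [] false = midB (pre ++ l) start end_ := by
  induction l generalizing pre with
  | nil =>
    have h1 : List.findIdx? (fun b => decide (start ≤ b)) pre = none := by
      rw [List.findIdx?_eq_none_iff]; intro x hx; simpa using not_le.2 (hpre x hx).1
    simp [bLoop, midB, sIdxB, h1]
  | cons b rest ih =>
    have hps : ∀ c ∈ pre, (fun b => decide (start ≤ b)) c = false := fun c hc => by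
      simpa using not_le.2 (hpre c hc).1
    have hpe : ∀ c ∈ pre, (fun b => decide (end_ ≤ b)) c = false := fun c hc => by
      simpa using not_le.2 (hpre c hc).2
    simp only [bLoop]
    by_cases hbe : end_ ≤ b
    · rw [if_pos hbe]
      have he : eIdx (pre ++ b :: rest) end_ = pre.length := by
        unfold eIdx
        rw [findIdx?_append_none _ pre _ hpe]
        simp [List.findIdx?_cons, hbe]
      have hs : pre.length ≤ sIdxB (pre ++ b :: rest) start := by
        unfold sIdxB
        rw [findIdx?_append_none _ pre _ hps]
        cases hf : List.findIdx? (fun b => decide (start ≤ b)) (b :: rest) with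
        | some j => simp only [Option.map_some, Option.getD_some]; omega
        | none =>
          simp only [Option.map_none, Option.getD_none, List.length_append, List.length_cons]
          omega
      have hz : eIdx (pre ++ b :: rest) end_ - sIdxB (pre ++ b :: rest) start = 0 := by
        rw [he]; omega
      simp [midB, hz]
    · rw [if_neg hbe]
      by_cases hbs : start ≤ b
      · rw [if_pos (by simp [hbs]), bLoop_collecting]
        have hs : sIdxB (pre ++ b :: rest) start = pre.length := by
          unfold sIdxB
          rw [findIdx?_append_none _ pre _ hps]
          simp [List.findIdx?_cons, hbs]
        have hdrop : (pre ++ b :: rest).drop pre.length = b :: rest := List.drop_left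
        unfold midB
        rw [hs, hdrop]
        unfold eIdx
        rw [findIdx?_append_none _ pre _ hpe]
        have hbe' : decide (end_ ≤ b) = false := by simpa using hbe
        simp only [List.findIdx?_cons, hbe']
        cases hf : rest.findIdx? (fun b => decide (end_ ≤ b)) <;> simp
      · rw [if_neg (by simp [hbs])]
        have := ih (pre ++ [b])
          (by intro c hc
              rcases List.mem_append.1 hc with h | h
              · exact hpre c h
              · simp at h; subst h; exact ⟨lt_of_not_ge hbs, lt_of_not_ge hbe⟩)
        simpa using this

theorem portB_eq_midB (beat_list : List Int) (start end_ : Int) :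
    update_beat_list_py_alt beat_list start end_ = midB beat_list start end_ := by
  have := bLoop_scan start end_ [] beat_list (by simp)
  simpa [update_beat_list_py_alt] using this

theorem findIdx?_lt_len {α : Type} {p : α → Bool} {l : List α} {j : Nat}
    (h : List.findIdx? p l = some j) : j < l.length := by
  induction l generalizing j with
  | nil => simp at h
  | cons a l ih =>
    rw [List.findIdx?_cons] at h
    by_cases hp : p a
    · simp [hp] at h
      simp
      omega
    · simp [hp] at h
      obtain ⟨j', hj', rfl⟩ := h
      have := ih hj'
      simp; omega

-- ===== VERDICT (by name: the statements are the Claim_ definitions above) =====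
theorem update_beat_list_py_spec : Claim_unchanged_update_beat_list_py := by
  intro beat_list start end_ _
  unfold Spec_update_beat_list_py
  intro hnD
  rw [portA_eq_mid, portB_eq_midB]
  unfold mid midB sIdx sIdxB
  cases hf : beat_list.findIdx? (fun b => decide (start ≤ b)) with
  | some j => rfl
  | none =>
    have hall : ∀ b ∈ beat_list, b < start := by
      intro b hb
      have := (List.findIdx?_eq_none_iff.1 hf) b hb
      simpa using this
    cases hbl : beat_list with
    | nil => rfl
    | cons x xs =>
      -- ¬D_ with all beats < start forces some beat ≥ end, so both slices are empty
      have hj : ∃ j, List.findIdx? (fun b => decide (end_ ≤ b)) beat_list = some j := by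
        rcases Option.eq_none_or_eq_some (List.findIdx? (fun b => decide (end_ ≤ b)) beat_list)
          with hg | hg
        · exfalso
          apply hnD
          refine ⟨by simp [hbl], fun b hb => ⟨hall b hb, ?_⟩⟩
          have := (List.findIdx?_eq_none_iff.1 hg) b hb
          simpa using this
        · exact hg
      obtain ⟨j, hg⟩ := hj
      have hjlt : j < beat_list.length := findIdx?_lt_len hg
      rw [← hbl]
      simp only [eIdx, hg, Option.getD_none, Option.getD_some]
      have h1 : j - (beat_list.length - 1) = 0 := by omega
      have h2 : j - beat_list.length = 0 := by omega
      simp [h1, h2]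

theorem update_beat_list_py_changed : Claim_changed_update_beat_list_py := by
  unfold Claim_changed_update_beat_list_py; decide

theorem update_beat_list_py_tight : Claim_exact_update_beat_list_py := by
  intro beat_list start end_ _ hD
  rcases hD with ⟨hne, hall⟩
  have hs : List.findIdx? (fun b => decide (start ≤ b)) beat_list = none := by
    rw [List.findIdx?_eq_none_iff]; intro x hx; simpa using not_le.2 (hall x hx).1
  have he : List.findIdx? (fun b => decide (end_ ≤ b)) beat_list = none := by
    rw [List.findIdx?_eq_none_iff]; intro x hx; simpa using not_le.2 (hall x hx).2
  rw [portA_eq_mid, portB_eq_midB]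
  unfold mid midB sIdx sIdxB eIdx
  rw [hs, he]
  simp only [Option.getD_none]
  have hlen : 1 ≤ beat_list.length := by
    cases beat_list with
    | nil => exact absurd rfl hne
    | cons a l => simp
  intro hEq
  -- A's value has length 1 (slice [n-1:n] of a nonempty list), B's has length 0
  have hA : (((beat_list.drop (beat_list.length - 1)).take
      (beat_list.length - (beat_list.length - 1))).map (fun v => v - start)).length = 1 := by
    simp [List.length_take, List.length_drop]; omega
  have hB : (((beat_list.drop beat_list.length).take
      (beat_list.length - beat_list.length)).map (fun v => v - start)).length = 0 := by
    simp
  rw [hEq, hB] at hA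
  exact absurd hA (by simp)
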